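-- pv_equiv track=rewrite | github.com/rajasekhar02/reading-x-source-code | Complete Reference/unsolved/countPrefixSubstrings.py | groupsOfK
-- ===== SOURCE A (Python) =====
-- from collections import Counter
--
-- def groupsOfK(strList, k):
--     counter = Counter()
--     for s in strList:
--         for j in range(len(s)):
--             prefix = s[: j + 1]
--             counter[prefix] += 1
--     result = 0
--     for prefix, count in counter.items():
--         result += count // k
--     return result
-- ===== SOURCE B (Python) =====
-- def groupsOfK(strList, k):
--     # Trie via grouping on the first character, explicit work-list instead of
--     # recursion: each node's count is the size of its group; one pass over the
--     # total input length instead of hashing every prefix of every string.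
--     total = 0
--     stack = [[s for s in strList if s]]
--     while stack:
--         xs = stack.pop()
--         groups = {}
--         for s in xs:
--             groups.setdefault(s[0], []).append(s[1:])
--         for tails in groups.values():
--             total += len(tails) // k
--             rest = [t for t in tails if t]
--             if rest:
--                 stack.append(rest)
--     return total
-- ===== Notes on version B (the rewrite author's own statement) =====
-- stated objective: faster
-- what changed: Replaces the Counter over every prefix slice of every string (quadratic in string length) by a trie built as work-list grouping on the first character, summing group_size//k per node in one pass over the total input length.
import Mathlib
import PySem

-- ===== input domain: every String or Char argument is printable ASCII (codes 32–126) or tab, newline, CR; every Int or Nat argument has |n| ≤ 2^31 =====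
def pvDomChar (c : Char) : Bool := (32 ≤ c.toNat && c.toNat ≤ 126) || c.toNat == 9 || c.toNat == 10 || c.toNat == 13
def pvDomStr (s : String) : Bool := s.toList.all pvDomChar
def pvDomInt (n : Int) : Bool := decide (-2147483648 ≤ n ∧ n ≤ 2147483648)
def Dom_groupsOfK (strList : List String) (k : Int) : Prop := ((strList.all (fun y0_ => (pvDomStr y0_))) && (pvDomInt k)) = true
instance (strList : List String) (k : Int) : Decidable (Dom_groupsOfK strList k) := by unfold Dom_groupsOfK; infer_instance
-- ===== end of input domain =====

-- B replaces A's Counter over every prefix slice by a trie built as work-list grouping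
-- on the first character (one pass over the total input length); return values proved equal.

-- ===== PORT A =====
-- Counter over all prefix slices, then sum count // k over its items.
def groupsOfK (strList : List String) (k : Int) : Int :=
  let counter : PySem.Dict String Int :=
    strList.foldl (fun counter s =>
      (PySem.List.pyRange 0 (PySem.Str.len s) 1).foldl (fun counter j =>
        let pfx := PySem.Str.slice s none (some (j + 1))
        counter.modify pfx 0 (· + 1)) counter) PySem.Dict.empty
  counter.items.foldl (fun result pc => result + PySem.Int.floordiv pc.2 k) 0

-- ===== PORT B =====
-- strings are handled as their char lists; s[0]/s[1:] are head/tail.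
-- `groups.setdefault(s[0], []).append(s[1:])` stores tail under the head key with
-- default [] — exactly `Dict.modify c [] (· ++ [t])`; the `[]` match arm is pure
-- totalization (B's work lists never contain empty strings).
def pvGroups (xs : List (List Char)) : PySem.Dict Char (List (List Char)) :=
  xs.foldl (fun groups s =>
    match s with
    | [] => groups
    | c :: t => groups.modify c [] (fun l => l ++ [t])) PySem.Dict.empty

-- helpers used to characterise pvGroups for the termination argument (and reused by the proofs)
def pvPairs (xs : List (List Char)) : List (Char × List Char) :=
  xs.filterMap (fun s => match s with | [] => none | c :: t => some (c, t))

def pvW (xs : List (List Char)) : Nat := (xs.map List.length).sum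

def pvNu (stack : List (List (List Char))) : Nat := (stack.map (fun xs => pvW xs + 1)).sum

-- generic fiber-partition of a sum over a list, used by the termination bound and the proofs
theorem pv_ite_sum {κ M : Type} [BEq κ] [LawfulBEq κ] [AddCommMonoid M]
    (D : List κ) (hD : D.Nodup) (x : κ) (hx : x ∈ D) (u : M) (f : κ → M) :
    (D.map (fun c => if x == c then u + f c else f c)).sum = u + (D.map f).sum := by
  induction D with
  | nil => simp at hx
  | cons c D ih =>
    rcases List.mem_cons.mp hx with h | h
    · subst h
      have : ∀ c' ∈ D, (if x == c' then u + f c' else f c') = f c' := by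
        intro c' hc'
        have : x ≠ c' := by rintro rfl; exact (List.nodup_cons.mp hD).1 hc'
        simp [this]
      simp only [List.map_cons, List.sum_cons, BEq.rfl, if_pos]
      rw [List.map_congr_left this]
      rw [add_assoc]
    · have hxc : x ≠ c := by rintro rfl; exact (List.nodup_cons.mp hD).1 h
      have hbeq : (x == c) = false := by simp [hxc]
      simp only [List.map_cons, List.sum_cons, hbeq, if_neg Bool.false_ne_true]
      rw [ih (List.nodup_cons.mp hD).2 h]
      rw [← add_assoc, ← add_assoc, add_comm (f c) u]

theorem pv_sum_map_fiber {α κ M : Type} [BEq κ] [LawfulBEq κ] [AddCommMonoid M]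
    (l : List α) (key : α → κ) (g : α → M) :
    (l.map g).sum
      = ((PySem.List.dedup (l.map key)).map
          (fun c => ((l.filter (fun a => key a == c)).map g).sum)).sum := by
  induction l with
  | nil => simp [PySem.List.dedup]
  | cons a l ih =>
    have hD : (PySem.List.dedup ((a :: l).map key)).Nodup := PySem.List.nodup_dedup _
    have hD' : (PySem.List.dedup (l.map key)).Nodup := PySem.List.nodup_dedup _
    have hmem : key a ∈ PySem.List.dedup ((a :: l).map key) := by
      rw [PySem.List.mem_dedup]; simp
    have hfs0 : ∀ c, c ∉ l.map key → ((l.filter (fun x => key x == c)).map g).sum = 0 := by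
      intro c hc
      have : l.filter (fun x => key x == c) = [] := by
        rw [List.filter_eq_nil_iff]
        intro x hx hb
        exact hc (List.mem_map.mpr ⟨x, hx, by simpa using hb⟩)
      simp [this]
    have hfiber : ∀ c, (((a :: l).filter (fun x => key x == c)).map g).sum
        = (if key a == c then g a + ((l.filter (fun x => key x == c)).map g).sum
           else ((l.filter (fun x => key x == c)).map g).sum) := by
      intro c
      by_cases h : key a = c
      · subst h; simp
      · simp [h]
    rw [List.map_congr_left (fun c _ => hfiber c)]
    rw [pv_ite_sum _ hD _ hmem]
    have hY : ((PySem.List.dedup ((a :: l).map key)).map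
          (fun c => ((l.filter (fun x => key x == c)).map g).sum)).sum
        = ((PySem.List.dedup (l.map key)).map
          (fun c => ((l.filter (fun x => key x == c)).map g).sum)).sum := by
      by_cases hka : key a ∈ PySem.List.dedup (l.map key)
      · have hperm : (PySem.List.dedup ((a :: l).map key)).Perm (PySem.List.dedup (l.map key)) := by
          rw [List.perm_ext_iff_of_nodup hD hD']
          intro c
          rw [PySem.List.mem_dedup, PySem.List.mem_dedup]
          simp only [List.map_cons, List.mem_cons]
          constructor
          · rintro (rfl | h)
            · exact (PySem.List.mem_dedup _ _).mp hka
            · exact h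
          · exact Or.inr
        exact (hperm.map _).sum_eq
      · have hperm : (PySem.List.dedup ((a :: l).map key)).Perm (key a :: PySem.List.dedup (l.map key)) := by
          rw [List.perm_ext_iff_of_nodup hD (List.nodup_cons.mpr ⟨hka, hD'⟩)]
          intro c
          rw [PySem.List.mem_dedup, List.mem_cons, PySem.List.mem_dedup]
          simp
        rw [(hperm.map _).sum_eq]
        have : ((l.filter (fun x => key x == key a)).map g).sum = 0 :=
          hfs0 _ (fun h => hka ((PySem.List.mem_dedup _ _).mpr h))
        simp [this]
    rw [hY, ← ih]
    simp

theorem pvGroups_eq_pairs_aux (xs : List (List Char)) (d : PySem.Dict Char (List (List Char))) :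
    xs.foldl (fun groups s =>
      match s with
      | [] => groups
      | c :: t => groups.modify c [] (fun l => l ++ [t])) d
    = (pvPairs xs).foldl (fun d p => d.modify p.1 [] (fun l => l ++ [p.2])) d := by
  induction xs generalizing d with
  | nil => simp [pvPairs]
  | cons s xs ih =>
    cases s with
    | nil => simpa [pvPairs, List.filterMap_cons] using ih d
    | cons c t => simpa [pvPairs, List.filterMap_cons] using ih _

theorem pv_keys_pvGroups (xs : List (List Char)) :
    (pvGroups xs).keys = PySem.List.dedup ((pvPairs xs).map (·.1)) := by
  rw [pvGroups, pvGroups_eq_pairs_aux]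
  rw [PySem.Dict.keys_foldl_modify_key (pvPairs xs) (·.1) [] (fun _ p l => l ++ [p.2])]
  rw [PySem.List.dedup_eq_ofList]
  rfl

theorem pv_nodup_keys_pvGroups (xs : List (List Char)) : (pvGroups xs).keys.Nodup := by
  rw [pv_keys_pvGroups]; exact PySem.List.nodup_dedup _

theorem pv_values_pvGroups (xs : List (List Char)) :
    (pvGroups xs).values
      = (PySem.List.dedup ((pvPairs xs).map (·.1))).map
          (fun c => (((pvPairs xs).filter (fun p => p.1 == c)).map (·.2))) := by
  rw [PySem.Dict.values_eq_map_keys _ (pv_nodup_keys_pvGroups xs) [], pv_keys_pvGroups]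
  apply List.map_congr_left
  intro c _
  rw [pvGroups, pvGroups_eq_pairs_aux]
  rw [PySem.Dict.getD_foldl_modify_append]
  simp

theorem pv_fiber_ne_nil {xs : List (List Char)} {c : Char}
    (h : c ∈ (pvPairs xs).map (·.1)) : ((pvPairs xs).filter (fun p => p.1 == c)) ≠ [] := by
  obtain ⟨p, hp, rfl⟩ := List.mem_map.mp h
  intro hnil
  have : p ∈ (pvPairs xs).filter (fun p' => p'.1 == p.1) :=
    List.mem_filter.mpr ⟨hp, by simp⟩
  simp [hnil] at this

theorem pvW_filter_le (tails : List (List Char)) (p : List Char → Bool) :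
    pvW (tails.filter p) ≤ pvW tails :=
  List.Sublist.sum_le_sum (List.Sublist.map _ (List.filter_sublist)) (by simp)

theorem pvNu_foldl_le (k : Int) (vals : List (List (List Char))) (t0 : Int)
    (st0 : List (List (List Char))) :
    pvNu ((vals.foldl (fun st tails =>
        let total := st.1 + PySem.Int.floordiv (tails.length : Int) k
        let rest := tails.filter (fun t => !t.isEmpty)
        if rest.isEmpty then (total, st.2) else (total, st.2 ++ [rest])) (t0, st0)).2)
      ≤ pvNu st0 + (vals.map (fun tails => pvW tails + 1)).sum := by
  induction vals generalizing t0 st0 with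
  | nil => simp
  | cons tails vals ih =>
    simp only [List.foldl_cons, List.map_cons, List.sum_cons]
    by_cases h : (tails.filter (fun t => !t.isEmpty)).isEmpty
    · simp only [h, if_pos]
      calc _ ≤ pvNu st0 + (vals.map (fun tails => pvW tails + 1)).sum := ih _ _
        _ ≤ _ := by omega
    · rw [if_neg (by simp [h])]
      calc _ ≤ pvNu (st0 ++ [tails.filter (fun t => !t.isEmpty)])
                + (vals.map (fun tails => pvW tails + 1)).sum := ih _ _
        _ ≤ _ := by
            have h1 : pvNu (st0 ++ [tails.filter (fun t => !t.isEmpty)])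
                = pvNu st0 + (pvW (tails.filter (fun t => !t.isEmpty)) + 1) := by
              simp [pvNu]
            have h2 := pvW_filter_le tails (fun t => !t.isEmpty)
            omega

theorem pv_sum_len_add_one (l : List (Char × List Char)) :
    (l.map (fun p => p.2.length + 1)).sum = (l.map (fun p => p.2.length)).sum + l.length := by
  induction l with
  | nil => simp
  | cons p l ih => simp [ih]; omega

theorem pv_pairs_le (xs : List (List Char)) :
    ((pvPairs xs).map (fun p => p.2.length + 1)).sum ≤ pvW xs := by
  induction xs with
  | nil => simp [pvPairs, pvW]
  | cons s xs ih =>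
    cases s with
    | nil =>
      simp only [pvPairs, List.filterMap_cons, pvW, List.map_cons, List.sum_cons] at *
      omega
    | cons c t =>
      simp only [pvPairs, List.filterMap_cons, pvW, List.map_cons, List.sum_cons] at *
      simp only [List.length_cons]
      omega

theorem pv_vals_sum_le (xs : List (List Char)) :
    ((pvGroups xs).values.map (fun tails => pvW tails + 1)).sum ≤ pvW xs := by
  rw [pv_values_pvGroups, List.map_map]
  calc ((PySem.List.dedup ((pvPairs xs).map (·.1))).map
        ((fun tails => pvW tails + 1) ∘ fun c => (((pvPairs xs).filter (fun p => p.1 == c)).map (·.2)))).sum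
      ≤ ((PySem.List.dedup ((pvPairs xs).map (·.1))).map
        (fun c => (((pvPairs xs).filter (fun p => p.1 == c)).map (fun p => p.2.length + 1)).sum)).sum := by
        apply List.sum_le_sum
        intro c hc
        have hne := pv_fiber_ne_nil ((PySem.List.mem_dedup _ _).mp hc)
        have hlen : 1 ≤ ((pvPairs xs).filter (fun p => p.1 == c)).length :=
          Nat.one_le_iff_ne_zero.mpr (by simpa using hne)
        simp only [Function.comp_def, pvW, List.map_map, pv_sum_len_add_one]
        omega
    _ = ((pvPairs xs).map (fun p => p.2.length + 1)).sum :=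
        (pv_sum_map_fiber (pvPairs xs) (·.1) (fun p => p.2.length + 1)).symm
    _ ≤ pvW xs := pv_pairs_le xs

theorem pvNu_step (k : Int) (xs : List (List Char)) (t0 : Int) (st0 : List (List (List Char))) :
    pvNu ((pvGroups xs).values.foldl (fun st tails =>
        let total := st.1 + PySem.Int.floordiv (tails.length : Int) k
        let rest := tails.filter (fun t => !t.isEmpty)
        if rest.isEmpty then (total, st.2) else (total, st.2 ++ [rest])) (t0, st0)).2
      ≤ pvNu st0 + pvW xs := by
  calc _ ≤ pvNu st0 + ((pvGroups xs).values.map (fun tails => pvW tails + 1)).sum :=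
        pvNu_foldl_le k _ t0 st0
    _ ≤ _ := by have := pv_vals_sum_le xs; omega

-- the while-loop: pop a group from the work list, count it, push the surviving tails
def altLoop (k : Int) (total : Int) (stack : List (List (List Char))) : Int :=
  match h : stack.getLast? with
  | none => total
  | some xs =>
    let stack' := stack.dropLast
    let step := (pvGroups xs).values.foldl (fun st tails =>
        let total := st.1 + PySem.Int.floordiv (tails.length : Int) k
        let rest := tails.filter (fun t => !t.isEmpty)
        if rest.isEmpty then (total, st.2) else (total, st.2 ++ [rest])) (total, stack')
    altLoop k step.1 step.2
termination_by pvNu stack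
decreasing_by
  have hne : stack ≠ [] := by
    intro hnil; rw [hnil] at h; simp at h
  calc pvNu _ ≤ pvNu stack.dropLast + pvW xs := pvNu_step k xs total stack.dropLast
    _ < pvNu stack := by
        conv_rhs => rw [← List.dropLast_append_getLast hne]
        have : xs = stack.getLast hne := by
          rw [List.getLast?_eq_some_getLast hne] at h
          exact (Option.some_inj.mp h).symm
        subst this
        simp [pvNu]

def groupsOfK_alt (strList : List String) (k : Int) : Int :=
  altLoop k 0 [(strList.map String.toList).filter (fun s => !s.isEmpty)]

-- ===== PRECONDITION & SPEC =====
-- Pre_ excludes exactly the inputs where Python A raises ZeroDivisionError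
-- (k = 0 while some string is nonempty); B raises there as well.
def Pre_groupsOfK (strList : List String) (k : Int) : Prop :=
  k ≠ 0 ∨ strList.all (fun s => s == "") = true
instance (strList : List String) (k : Int) : Decidable (Pre_groupsOfK strList k) := by
  unfold Pre_groupsOfK; infer_instance

def pvWitness_groupsOfK : List String × Int := (["ab", "a", "b"], 2)

def Spec_groupsOfK (strList : List String) (k : Int) (out : Int) : Prop := out = groupsOfK_alt strList k
instance (strList : List String) (k : Int) (out : Int) : Decidable (Spec_groupsOfK strList k out) := by unfold Spec_groupsOfK; infer_instance

-- ===== CLAIM (what is proved, stated in full; the proofs are below) =====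
def Claim_equal_groupsOfK : Prop := ∀ (strList : List String) (k : Int), Dom_groupsOfK strList k → Pre_groupsOfK strList k → Spec_groupsOfK strList k (groupsOfK strList k)

-- ===== LEMMAS AND PROOFS =====

def pvOcc (s : List Char) : List (List Char) := (List.range s.length).map (fun j => s.take (j + 1))

def pvOccL (xs : List (List Char)) : List (List Char) := xs.flatMap pvOcc

def pvG {α : Type} [DecidableEq α] (k : Int) (m : Multiset α) : Int :=
  ∑ p ∈ m.toFinset, PySem.Int.floordiv (Multiset.count p m : Int) k

def pvPhi (k : Int) (stack : List (List (List Char))) : Int :=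
  (stack.map (fun xs => pvG k (↑(pvOccL xs) : Multiset (List Char)))).sum

theorem pvG_add_disjoint {α : Type} [DecidableEq α] (k : Int) (m₁ m₂ : Multiset α)
    (h : ∀ p, p ∈ m₁ → p ∉ m₂) : pvG k (m₁ + m₂) = pvG k m₁ + pvG k m₂ := by
  unfold pvG
  rw [Multiset.toFinset_add]
  have hdisj : Disjoint m₁.toFinset m₂.toFinset := by
    rw [Finset.disjoint_left]
    intro p hp hp2
    exact h p (Multiset.mem_toFinset.mp hp) (Multiset.mem_toFinset.mp hp2)
  rw [Finset.sum_union hdisj]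
  congr 1
  · apply Finset.sum_congr rfl
    intro p hp
    have h2 : Multiset.count p m₂ = 0 :=
      Multiset.count_eq_zero.mpr (h p (Multiset.mem_toFinset.mp hp))
    simp [Multiset.count_add, h2]
  · apply Finset.sum_congr rfl
    intro p hp
    have h1 : Multiset.count p m₁ = 0 :=
      Multiset.count_eq_zero.mpr (fun hmem => h p hmem (Multiset.mem_toFinset.mp hp))
    simp [Multiset.count_add, h1]

theorem pvG_map_inj {α β : Type} [DecidableEq α] [DecidableEq β] (k : Int)
    {f : α → β} (hf : Function.Injective f) (m : Multiset α) :
    pvG k (m.map f) = pvG k m := by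
  unfold pvG
  rw [Multiset.toFinset_map, Finset.sum_image (fun x _ y _ h => hf h)]
  apply Finset.sum_congr rfl
  intro p _
  rw [Multiset.count_map_eq_count' f m hf]

theorem pvG_replicate {α : Type} [DecidableEq α] (k : Int) (n : Nat) (hn : 0 < n) (x : α) :
    pvG k (Multiset.replicate n x) = PySem.Int.floordiv (n : Int) k := by
  unfold pvG
  rw [Multiset.toFinset_replicate, if_neg (by omega)]
  simp [Multiset.count_replicate]

theorem pv_count_eq {α : Type} [DecidableEq α] (b1 : BEq α) (h1 : @LawfulBEq α b1)
    (p : α) (l : List α) :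
    @List.count α b1 p l = @List.count α instBEqOfDecidableEq p l := by
  induction l with
  | nil => rfl
  | cons a l ih =>
    rw [@List.count_cons α b1, @List.count_cons α instBEqOfDecidableEq, ih]
    congr 1
    have e1 : (@BEq.beq α b1 a p) = decide (a = p) := @beq_eq_decide α b1 h1 _ a p
    have e2 : (@BEq.beq α instBEqOfDecidableEq a p) = decide (a = p) :=
      @beq_eq_decide α instBEqOfDecidableEq inferInstance _ a p
    rw [e1, e2]

theorem pv_count_coe {α : Type} [b : BEq α] [hb : LawfulBEq α] [DecidableEq α] (p : α) (l : List α) :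
    Multiset.count p (l : Multiset α) = List.count p l := by
  rw [Multiset.coe_count, pv_count_eq b hb]

theorem pv_sum_ofList_eq_pvG {α : Type} [BEq α] [LawfulBEq α] [DecidableEq α] (k : Int) (l : List α) :
    ((PySem.Set.ofList l).map (fun p => PySem.Int.floordiv (l.count p : Int) k)).sum
      = pvG k (l : Multiset α) := by
  unfold pvG
  have hnd : (PySem.Set.ofList l : List α).Nodup := PySem.Set.nodup_ofList l
  have h1 : (PySem.Set.ofList l : List α).toFinset.sum (fun p => PySem.Int.floordiv (l.count p : Int) k)
      = ((PySem.Set.ofList l).map (fun p => PySem.Int.floordiv (l.count p : Int) k)).sum :=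
    List.sum_toFinset _ hnd
  rw [← h1]
  apply Finset.sum_congr
  · ext p
    simp [PySem.Set.mem_ofList]
  · intro p _
    rw [pv_count_coe]

def pvPrefixesStr (s : String) : List String :=
  (List.range s.toList.length).map (fun (j : Nat) => PySem.Str.slice s none (some ((j : Int) + 1)))
theorem pv_foldl_flatMap {α β σ : Type} (l : List α) (f : α → List β) (g : σ → β → σ)
    (init : σ) :
    (l.flatMap f).foldl g init = l.foldl (fun acc x => (f x).foldl g acc) init := by
  induction l generalizing init with
  | nil => rfl
  | cons a l ih => simp [List.flatMap_cons, List.foldl_append, ih]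

theorem pv_foldl_congr {α σ : Type} (l : List α) (f g : σ → α → σ)
    (h : ∀ acc x, f acc x = g acc x) (init : σ) : l.foldl f init = l.foldl g init := by
  induction l generalizing init with
  | nil => rfl
  | cons a l ih => simp only [List.foldl_cons, h, ih]

theorem pv_inner_foldl (s : String) (c : PySem.Dict String Int) :
    (PySem.List.pyRange 0 (PySem.Str.len s) 1).foldl (fun counter j =>
        let pfx := PySem.Str.slice s none (some (j + 1))
        counter.modify pfx 0 (· + 1)) c
    = (pvPrefixesStr s).foldl (fun counter pfx => counter.modify pfx 0 (· + 1)) c := by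
  rw [PySem.Str.len_eq, PySem.List.pyRange_zero_natCast, List.foldl_map,
    pvPrefixesStr, List.foldl_map]

theorem pv_counter_eq (strList : List String) :
    strList.foldl (fun counter s =>
      (PySem.List.pyRange 0 (PySem.Str.len s) 1).foldl (fun counter j =>
        let pfx := PySem.Str.slice s none (some (j + 1))
        counter.modify pfx 0 (· + 1)) counter) PySem.Dict.empty
    = PySem.Dict.counter (strList.flatMap pvPrefixesStr) := by
  rw [PySem.Dict.counter_eq_foldl, pv_foldl_flatMap]
  exact pv_foldl_congr _ _ _ (fun acc s => pv_inner_foldl s acc) _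

theorem pv_prefixes_toList (s : String) :
    (pvPrefixesStr s).map String.toList = pvOcc s.toList := by
  unfold pvPrefixesStr pvOcc
  rw [List.map_map]
  apply List.map_congr_left
  intro j _
  simp only [Function.comp_apply, PySem.Str.toList_slice, PySem.Chars.slice_eq_listSlice]
  have : ((j : Int) + 1) = ((j + 1 : Nat) : Int) := by push_cast; ring
  rw [this, PySem.List.slice_to_natCast]

theorem groupsOfK_eq_pvG (strList : List String) (k : Int) :
    groupsOfK strList k = pvG k (↑(pvOccL (strList.map String.toList)) : Multiset (List Char)) := by
  unfold groupsOfK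
  rw [pv_counter_eq]
  simp only [PySem.Dict.items_counter, PySem.List.foldl_add, List.map_map, Function.comp_def]
  rw [pv_sum_ofList_eq_pvG, zero_add]
  rw [← pvG_map_inj (k := k) (f := String.toList) (fun a b h => String.toList_inj.mp h)
        (↑(strList.flatMap pvPrefixesStr))]
  congr 1
  rw [Multiset.map_coe]
  congr 1
  rw [List.map_flatMap, pvOccL, List.flatMap_map]
  apply List.flatMap_congr
  intro s _
  exact pv_prefixes_toList s

theorem pv_occ_cons (c : Char) (t : List Char) :
    pvOcc (c :: t) = [c] :: (pvOcc t).map (c :: ·) := by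
  unfold pvOcc
  rw [List.length_cons, List.range_succ_eq_map, List.map_cons, List.map_map, List.map_map]
  rfl

theorem pv_occ_ne_nil {s p : List Char} (h : p ∈ pvOcc s) : p ≠ [] := by
  obtain ⟨j, hj, rfl⟩ := List.mem_map.mp h
  have hlen : 0 < s.length := by
    have := List.mem_range.mp hj; omega
  simp only [ne_eq, List.take_eq_nil_iff]
  rintro (h1 | rfl)
  · omega
  · simp at hlen

theorem pv_occL_ne_nil {xs : List (List Char)} {p : List Char} (h : p ∈ pvOccL xs) : p ≠ [] := by
  obtain ⟨s, _, hp⟩ := List.mem_flatMap.mp h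
  exact pv_occ_ne_nil hp

theorem pv_occ_head {c : Char} {t p : List Char} (h : p ∈ pvOcc (c :: t)) : ∃ u, p = c :: u := by
  rw [pv_occ_cons] at h
  rcases List.mem_cons.mp h with h | h
  · exact ⟨[], h⟩
  · obtain ⟨q, _, rfl⟩ := List.mem_map.mp h
    exact ⟨q, rfl⟩

theorem pv_coe_flatMap (xs : List (List Char)) :
    (↑(pvOccL xs) : Multiset (List Char)) = (xs.map (fun s => (↑(pvOcc s) : Multiset (List Char)))).sum := by
  induction xs with
  | nil => rfl
  | cons s xs ih => simp only [pvOccL, List.flatMap_cons, List.map_cons, List.sum_cons, ← ih]; simp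

theorem pv_occ_nil : pvOcc [] = [] := rfl

theorem pv_occL_pairs (xs : List (List Char)) :
    (↑(pvOccL xs) : Multiset (List Char))
      = ((pvPairs xs).map (fun p => (↑(pvOcc (p.1 :: p.2)) : Multiset (List Char)))).sum := by
  rw [pv_coe_flatMap]
  induction xs with
  | nil => rfl
  | cons s xs ih =>
    cases s with
    | nil => simpa [pvPairs, List.filterMap_cons, pv_occ_nil] using ih
    | cons c t => simp only [pvPairs, List.filterMap_cons, List.map_cons, List.sum_cons] at *; rw [ih]

theorem pv_occL_filter_list (xs : List (List Char)) :
    pvOccL (xs.filter (fun t => !t.isEmpty)) = pvOccL xs := by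
  induction xs with
  | nil => rfl
  | cons s xs ih =>
    cases s with
    | nil => simpa [pvOccL, List.filter_cons, pv_occ_nil] using ih
    | cons c t => simp [pvOccL] at *; rw [ih]

theorem pv_mem_map_sum {α : Type} {p : List Char} (l : List α) (g : α → Multiset (List Char)) :
    p ∈ (l.map g).sum ↔ ∃ c ∈ l, p ∈ g c := by
  induction l with
  | nil => simp
  | cons a l ih => simp [Multiset.mem_add, ih]

theorem pv_fiber_block (c : Char) (fiber : List (Char × List Char))
    (hall : ∀ p ∈ fiber, p.1 = c) :
    (fiber.map (fun p => (↑(pvOcc (p.1 :: p.2)) : Multiset (List Char)))).sum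
      = Multiset.replicate fiber.length [c]
        + Multiset.map (c :: ·) (↑(pvOccL (fiber.map (·.2))) : Multiset (List Char)) := by
  induction fiber with
  | nil => rfl
  | cons p fiber ih =>
    have hc : p.1 = c := hall p List.mem_cons_self
    simp only [List.map_cons, List.sum_cons, List.length_cons, pvOccL, List.flatMap_cons]
    rw [ih (fun q hq => hall q (List.mem_cons_of_mem _ hq))]
    rw [hc, pv_occ_cons]
    have hco : (↑(([c] :: (pvOcc p.2).map (c :: ·))) : Multiset (List Char))
        = [c] ::ₘ ↑((pvOcc p.2).map (c :: ·)) := rfl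
    rw [hco]
    rw [show (↑(pvOcc p.2 ++ List.flatMap pvOcc (List.map (fun x => x.2) fiber)) : Multiset (List Char))
        = ↑(pvOcc p.2) + ↑(List.flatMap pvOcc (List.map (fun x => x.2) fiber)) from by simp]
    rw [Multiset.replicate_succ, Multiset.map_add]
    simp only [Multiset.map_coe, ← Multiset.singleton_add]
    abel

theorem pvG_sum_blocks (k : Int) (D : List Char) (hD : D.Nodup)
    (block : Char → Multiset (List Char))
    (hblock : ∀ c ∈ D, ∀ p ∈ block c, ∃ t, p = c :: t) :
    pvG k ((D.map block).sum) = (D.map (fun c => pvG k (block c))).sum := by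
  induction D with
  | nil => simp [pvG]
  | cons c D ih =>
    simp only [List.map_cons, List.sum_cons]
    rw [pvG_add_disjoint k _ _ ?hdisj]
    · rw [ih (List.nodup_cons.mp hD).2 (fun c' hc' => hblock c' (List.mem_cons_of_mem _ hc'))]
    case hdisj =>
      intro p hp hmem
      obtain ⟨t, rfl⟩ := hblock c List.mem_cons_self p hp
      obtain ⟨c', hc', hpc'⟩ := (pv_mem_map_sum D block).mp hmem
      obtain ⟨t', heq⟩ := hblock c' (List.mem_cons_of_mem _ hc') (c :: t) hpc'
      have : c = c' := by injection heq
      subst this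
      exact (List.nodup_cons.mp hD).1 hc'


theorem pv_node (k : Int) (xs : List (List Char)) :
    (((pvGroups xs).values).map
        (fun tails => PySem.Int.floordiv (tails.length : Int) k
          + pvG k (↑(pvOccL (tails.filter (fun t => !t.isEmpty))) : Multiset (List Char)))).sum
      = pvG k (↑(pvOccL xs) : Multiset (List Char)) := by
  rw [pv_values_pvGroups, List.map_map]
  rw [pv_occL_pairs]
  rw [pv_sum_map_fiber (pvPairs xs) (·.1) (fun p => (↑(pvOcc (p.1 :: p.2)) : Multiset (List Char)))]
  set D := PySem.List.dedup ((pvPairs xs).map (·.1)) with hDdef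
  have hfst : ∀ c : Char, ∀ p ∈ (pvPairs xs).filter (fun p => p.1 == c), p.1 = c := by
    intro c p hp
    simpa using (List.mem_filter.mp hp).2
  rw [pvG_sum_blocks k D (by rw [hDdef]; exact PySem.List.nodup_dedup _)]
  · refine congrArg List.sum (List.map_congr_left ?_)
    intro c hc
    have hfib := pv_fiber_ne_nil (xs := xs) (c := c) (by
      have := (PySem.List.mem_dedup ((pvPairs xs).map (·.1)) c).mp hc
      simpa using this)
    rw [pv_fiber_block c _ (hfst c)]
    rw [pvG_add_disjoint k _ _ ?hd]
    · rw [pvG_replicate k _ (by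
        have : ((pvPairs xs).filter (fun p => p.1 == c)).length ≠ 0 := by simpa using hfib
        omega)]
      rw [pvG_map_inj k (fun a b h => by injection h)]
      simp only [Function.comp_def, List.length_map, pv_occL_filter_list]
    case hd =>
      intro p hp hp2
      rw [Multiset.eq_of_mem_replicate hp] at hp2
      obtain ⟨q, hq, hqe⟩ := Multiset.mem_map.mp hp2
      have : q ≠ [] := pv_occL_ne_nil (by simpa using hq)
      apply this
      have : ([c] : List Char) = c :: q := hqe.symm
      injection this with _ h2
      exact h2.symm
  · intro c hc p hp
    obtain ⟨q, hq, hpq⟩ := (pv_mem_map_sum _ _).mp hp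
    have hq1 : q.1 = c := hfst c q hq
    obtain ⟨u, hu⟩ := pv_occ_head (c := q.1) (t := q.2) (p := p) hpq
    exact ⟨u, by rw [hu, hq1]⟩

theorem pv_foldl_inv (k : Int) (vals : List (List (List Char))) (t0 : Int)
    (st0 : List (List (List Char))) :
    (vals.foldl (fun st tails =>
        let total := st.1 + PySem.Int.floordiv (tails.length : Int) k
        let rest := tails.filter (fun t => !t.isEmpty)
        if rest.isEmpty then (total, st.2) else (total, st.2 ++ [rest])) (t0, st0)).1
      + pvPhi k ((vals.foldl (fun st tails =>
        let total := st.1 + PySem.Int.floordiv (tails.length : Int) k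
        let rest := tails.filter (fun t => !t.isEmpty)
        if rest.isEmpty then (total, st.2) else (total, st.2 ++ [rest])) (t0, st0)).2)
      = t0 + pvPhi k st0
        + (vals.map (fun tails => PySem.Int.floordiv (tails.length : Int) k
            + pvG k (↑(pvOccL (tails.filter (fun t => !t.isEmpty))) : Multiset (List Char)))).sum := by
  induction vals generalizing t0 st0 with
  | nil => simp
  | cons tails vals ih =>
    simp only [List.foldl_cons, List.map_cons, List.sum_cons]
    by_cases h : (tails.filter (fun t => !t.isEmpty)).isEmpty
    · rw [if_pos h]
      rw [ih]
      have hnil : tails.filter (fun t => !t.isEmpty) = [] := List.isEmpty_iff.mp h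
      rw [hnil]
      have : pvG k (↑(pvOccL ([] : List (List Char))) : Multiset (List Char)) = 0 := by
        simp [pvG, pvOccL]
      rw [this]
      ring
    · rw [if_neg (by simp [h])]
      rw [ih]
      have : pvPhi k (st0 ++ [tails.filter (fun t => !t.isEmpty)])
          = pvPhi k st0 + pvG k (↑(pvOccL (tails.filter (fun t => !t.isEmpty))) : Multiset (List Char)) := by
        simp [pvPhi]
      rw [this]
      ring

theorem altLoop_eq_phi_aux (k : Int) :
    ∀ n stack total, pvNu stack ≤ n → altLoop k total stack = total + pvPhi k stack := by
  intro n
  induction n using Nat.strong_induction_on with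
  | _ n ih =>
    intro stack total hle
    rw [altLoop.eq_def]
    cases hg : stack.getLast? with
    | none =>
      have : stack = [] := by simpa using hg
      subst this
      simp [pvPhi]
    | some xs =>
      simp only
      have hne : stack ≠ [] := by rintro rfl; simp at hg
      have hxs : xs = stack.getLast hne := by
        rw [List.getLast?_eq_some_getLast hne] at hg
        exact (Option.some_inj.mp hg).symm
      have hsplit : stack = stack.dropLast ++ [xs] := by
        rw [hxs, List.dropLast_append_getLast hne]
      have hlt : pvNu ((pvGroups xs).values.foldl (fun st tails =>
          let total := st.1 + PySem.Int.floordiv (tails.length : Int) k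
          let rest := tails.filter (fun t => !t.isEmpty)
          if rest.isEmpty then (total, st.2) else (total, st.2 ++ [rest])) (total, stack.dropLast)).2
          < pvNu stack := by
        calc _ ≤ pvNu stack.dropLast + pvW xs := pvNu_step k xs total stack.dropLast
          _ < pvNu stack := by
              conv_rhs => rw [hsplit]
              simp [pvNu]
      rw [ih _ (lt_of_lt_of_le hlt hle) _ _ le_rfl]
      rw [pv_foldl_inv, pv_node]
      conv_rhs => rw [hsplit]
      simp [pvPhi, add_assoc]

theorem altLoop_eq_phi (k : Int) (stack : List (List (List Char))) (total : Int) :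
    altLoop k total stack = total + pvPhi k stack :=
  altLoop_eq_phi_aux k (pvNu stack) stack total le_rfl

theorem groupsOfK_alt_eq_pvG (strList : List String) (k : Int) :
    groupsOfK_alt strList k = pvG k (↑(pvOccL (strList.map String.toList)) : Multiset (List Char)) := by
  unfold groupsOfK_alt
  rw [altLoop_eq_phi]
  simp only [pvPhi, List.map_cons, List.map_nil, List.sum_cons, List.sum_nil, add_zero, zero_add]
  rw [pv_occL_filter_list]

-- ===== VERDICT (by name: the statement is the Claim_ definition above) =====
theorem groupsOfK_spec : Claim_equal_groupsOfK := by
  intro strList k _ _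
  unfold Spec_groupsOfK
  rw [groupsOfK_eq_pvG, groupsOfK_alt_eq_pvG]
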